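-- pv_equiv track=rewrite | github.com/ilya13qwertyuiop-droid/dota-mini-app | backend/api.py | _pos_str_to_num
-- ===== SOURCE A (Python) =====
-- def _pos_str_to_num(pos) -> int | None:
--     """Convert position to 1..5. Accepts None.
--
--     Supported formats: '1'..'5', 'pos 1'..'pos 5', 'pos%201'..'pos%205'.
--     """
--     if not pos:
--         return None
--     s = str(pos).strip().replace("%20", " ").lower()
--     for i in range(1, 6):
--         if s == str(i) or s == f"pos {i}":
--             return i
--     return None
-- ===== SOURCE B (Python) =====
-- def _pos_str_to_num(pos) -> int | None:
--     """Convert position to 1..5. Accepts None.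
--
--     Normalize once, strip an exact 'pos ' prefix, then validate the digit.
--     """
--     if not pos:
--         return None
--     s = str(pos).strip().replace("%20", " ").lower()
--     if s.startswith("pos "):
--         s = s[4:]
--     return int(s) if s in {"1", "2", "3", "4", "5"} else None
-- ===== Notes on version B (the rewrite author's own statement) =====
-- stated objective: simpler
-- what changed: A loops over i=1..5 comparing the normalized string against ten candidate forms; B normalizes once, strips an exact 'pos ' prefix structurally, and validates the remainder by a single set membership on '1'..'5'.
import Mathlib
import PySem

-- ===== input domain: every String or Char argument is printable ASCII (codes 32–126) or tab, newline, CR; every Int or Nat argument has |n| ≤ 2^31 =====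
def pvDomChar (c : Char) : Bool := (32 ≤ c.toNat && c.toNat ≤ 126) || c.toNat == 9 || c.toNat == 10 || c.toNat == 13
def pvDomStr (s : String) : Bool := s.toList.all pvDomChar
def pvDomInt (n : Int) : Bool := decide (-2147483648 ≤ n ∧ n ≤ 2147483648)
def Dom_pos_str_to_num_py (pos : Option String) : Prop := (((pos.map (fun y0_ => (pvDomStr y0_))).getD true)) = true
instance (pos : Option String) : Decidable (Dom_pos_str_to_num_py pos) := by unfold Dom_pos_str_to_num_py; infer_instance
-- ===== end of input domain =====

-- B replaces A's loop over ten candidate strings by prefix-strip-then-validate-digit (objective: simpler).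

-- ===== PORT A =====
-- the 'for i in range(1, 6)' loop with early return
def posLoopA (s : String) : List Int → Option Int
  | [] => none
  | i :: rest => if s = PySem.Int.toStr i ∨ s = "pos " ++ PySem.Int.toStr i then some i else posLoopA s rest


def pos_str_to_num_py (pos : Option String) : Option Int :=
  match pos with
  | none => none
  | some p =>
    if p = "" then none
    else
      posLoopA (PySem.Str.lower (PySem.Str.replace (PySem.Str.strip p) "%20" " ")) (PySem.List.pyRange 1 6 1)

-- ===== PORT B =====
def pos_str_to_num_py_alt (pos : Option String) : Option Int :=
  match pos with
  | none => none
  | some p =>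
    if p = "" then none
    else
      let s := PySem.Str.lower (PySem.Str.replace (PySem.Str.strip p) "%20" " ")
      let t := if PySem.Str.startswith s "pos " then PySem.Str.slice s (some 4) none else s
      if (PySem.Set.ofList ["1", "2", "3", "4", "5"]).contains t then PySem.Int.ofStr? t else none

-- ===== PRECONDITION & SPEC =====
def Spec_pos_str_to_num_py (pos : Option String) (out : Option Int) : Prop := out = pos_str_to_num_py_alt pos
instance (pos : Option String) (out : Option Int) : Decidable (Spec_pos_str_to_num_py pos out) := by unfold Spec_pos_str_to_num_py; infer_instance

-- ===== CLAIM (what is proved, stated in full; the proofs are below) =====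
def Claim_equal_pos_str_to_num_py : Prop := ∀ (pos : Option String), Dom_pos_str_to_num_py pos → Spec_pos_str_to_num_py pos (pos_str_to_num_py pos)

-- ===== LEMMAS AND PROOFS =====

theorem str_eq_iff_toList (s t : String) : s = t ↔ s.toList = t.toList :=
  ⟨fun h => h ▸ rfl, fun h => String.ext (by simpa using h)⟩

theorem take_drop_min (l : List Char) (k : Nat) :
    List.take (l.length - min k l.length) (List.drop (min k l.length) l) = List.drop k l := by
  rcases le_total k l.length with h|h
  · rw [min_eq_left h]; exact List.take_of_length_le (by simp)
  · rw [min_eq_right h]; simp [List.drop_of_length_le h]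

theorem toList_slice4 (s : String) : (PySem.Str.slice s (some 4) none).toList = s.toList.drop 4 := by
  simp only [PySem.Str.toList_slice, PySem.Chars.slice_eq_listSlice, PySem.List.slice, PySem.List.clampIdx]
  norm_num
  exact take_drop_min s.toList 4

theorem core_eq (s : String) :
    posLoopA s (PySem.List.pyRange 1 6 1) =
      (let t := if PySem.Str.startswith s "pos " then PySem.Str.slice s (some 4) none else s
       if (PySem.Set.ofList ["1", "2", "3", "4", "5"]).contains t then PySem.Int.ofStr? t else none) := by
  have hrange : PySem.List.pyRange 1 6 1 = [1, 2, 3, 4, 5] := by decide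
  rw [hrange]
  by_cases h : PySem.Str.startswith s "pos " = true
  · -- s starts with "pos ": only the 'pos i' candidates can match, and they match iff the tail is that digit
    have h' := h
    rw [PySem.Str.startswith_eq] at h'
    obtain ⟨rest, hrest⟩ := (PySem.Chars.startswith_iff _ _).mp h'
    have hcs : s.toList = 'p'::'o'::'s'::' '::rest := by simpa using hrest.symm
    have ht : (PySem.Str.slice s (some 4) none).toList = rest := by
      rw [toList_slice4, hcs]; rfl
    simp only [h, if_true]
    by_cases h1 : rest = ['1']
    · have e2 : s = "pos 1" := by rw [str_eq_iff_toList, hcs, h1]; rfl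
      simp only [e2]; decide
    by_cases h2 : rest = ['2']
    · have e2 : s = "pos 2" := by rw [str_eq_iff_toList, hcs, h2]; rfl
      simp only [e2]; decide
    by_cases h3 : rest = ['3']
    · have e2 : s = "pos 3" := by rw [str_eq_iff_toList, hcs, h3]; rfl
      simp only [e2]; decide
    by_cases h4 : rest = ['4']
    · have e2 : s = "pos 4" := by rw [str_eq_iff_toList, hcs, h4]; rfl
      simp only [e2]; decide
    by_cases h5 : rest = ['5']
    · have e2 : s = "pos 5" := by rw [str_eq_iff_toList, hcs, h5]; rfl
      simp only [e2]; decide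
    -- no digit matches: both sides return none
    simp [posLoopA, PySem.Set.ofList, str_eq_iff_toList, hcs, ht, h1, h2, h3, h4, h5,
      show PySem.Int.toStr (1:Int) = "1" from by decide, show PySem.Int.toStr (2:Int) = "2" from by decide,
      show PySem.Int.toStr (3:Int) = "3" from by decide, show PySem.Int.toStr (4:Int) = "4" from by decide,
      show PySem.Int.toStr (5:Int) = "5" from by decide]
  · -- no 'pos ' prefix: the 'pos i' candidates cannot match
    have hne : ∀ r : List Char, s.toList ≠ 'p'::'o'::'s'::' '::r := by
      intro r hr
      apply h
      rw [PySem.Str.startswith_eq]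
      exact (PySem.Chars.startswith_iff _ _).mpr ⟨r, by simpa using hr.symm⟩
    simp only [h]
    by_cases c1 : s = "1"
    · subst c1; decide
    by_cases c2 : s = "2"
    · subst c2; decide
    by_cases c3 : s = "3"
    · subst c3; decide
    by_cases c4 : s = "4"
    · subst c4; decide
    by_cases c5 : s = "5"
    · subst c5; decide
    simp [posLoopA, PySem.Set.ofList, c1, c2, c3, c4, c5, str_eq_iff_toList, hne,
      show PySem.Int.toStr (1:Int) = "1" from by decide, show PySem.Int.toStr (2:Int) = "2" from by decide,
      show PySem.Int.toStr (3:Int) = "3" from by decide, show PySem.Int.toStr (4:Int) = "4" from by decide,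
      show PySem.Int.toStr (5:Int) = "5" from by decide]

-- ===== VERDICT (by name: the statement is the Claim_ definition above) =====
theorem pos_str_to_num_py_spec : Claim_equal_pos_str_to_num_py := by
  intro pos _
  unfold Spec_pos_str_to_num_py pos_str_to_num_py pos_str_to_num_py_alt
  match pos with
  | none => rfl
  | some p =>
    by_cases hp : p = "" <;> simp [hp, core_eq]
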